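-- pv_equiv track=rewrite | github.com/zztphy/HomeworkForSTCQP | MySolution/hw_1_TFI.py | CalPriR
-- ===== SOURCE A (Python) =====
-- N = 4  #num of sites
--
-- def PickBit(i, k, n): #pick up n bits from kth bit
--     return (i & ((2**n - 1) << k)) >> k
--
-- def RotLBit(i, L, n): #circular bit shift left
--     return (PickBit(i, 0, L-n) << n) + (i >> (L-n))
--
-- def CalPriR(PriC):
--     PriR = list()
--     for _i in range(len(PriC)):
--         _PriC = PriC[_i]
--         count = 1
--         while 1:
--             if RotLBit(_PriC, N, count) == _PriC:
--                 break
--             count += 1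
--         PriR.append(count)
--     return PriR
-- ===== SOURCE B (Python) =====
-- # Period of each value under 4-bit left rotation, by direct classification
-- # instead of rotate-and-compare. Writing v = q*2^m + r (0 <= r < 2^m), the
-- # shift-n identity RotLBit(v,4,n) == v is q*(2^m - 1) == r*(2^n - 1) with
-- # m = 4 - n, which over all ints has solutions only 0, 15 (n = 1), plus
-- # 5, 10 (n = 2); shift 4 fixes every int.  So the period is a table lookup.
-- _PERIOD = {0: 1, 15: 1, 5: 2, 10: 2}
--
-- def CalPriR(PriC):
--     return [_PERIOD.get(v, 4) for v in PriC]
-- ===== Notes on version B (the rewrite author's own statement) =====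
-- stated objective: faster
-- what changed: Replaces the per-element rotate-and-compare while-loop (mask/shift/add per candidate shift) with a precomputed closed-form period table {0:1,15:1,5:2,10:2} looked up once per element (every other int has period 4, proved by solving the rotation fixed-point equation over all ints).
import Mathlib
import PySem

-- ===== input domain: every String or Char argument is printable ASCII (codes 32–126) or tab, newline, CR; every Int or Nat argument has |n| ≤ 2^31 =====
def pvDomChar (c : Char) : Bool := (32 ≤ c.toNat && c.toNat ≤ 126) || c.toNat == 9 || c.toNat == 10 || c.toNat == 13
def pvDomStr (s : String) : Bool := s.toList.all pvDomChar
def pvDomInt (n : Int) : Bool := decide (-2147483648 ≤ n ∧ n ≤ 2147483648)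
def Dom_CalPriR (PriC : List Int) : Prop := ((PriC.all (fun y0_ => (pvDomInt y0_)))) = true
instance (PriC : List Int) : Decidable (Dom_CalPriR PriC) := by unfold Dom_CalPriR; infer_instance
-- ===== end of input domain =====

-- B replaces A's per-element rotate-and-compare loop with a closed-form period table lookup (faster by a constant factor).


-- ===== PORT A =====
-- N = 4
def pvN : Int := 4

-- PickBit(i, k, n) = (i & ((2**n - 1) << k)) >> k : hand port, exact for k, n ≥ 0 — Python's `&` with the
-- mask (2**n−1)<<k keeps bits k..k+n−1 of the infinite two's complement, i.e. (i mod 2^(k+n)) // 2^k.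
def PickBit (i : Int) (k n : Nat) : Int :=
  PySem.Int.floordiv (PySem.Int.mod i (2 ^ (k + n))) (2 ^ k)

-- RotLBit(i, L, n) = (PickBit(i, 0, L-n) << n) + (i >> (L-n)) : `x << n` is x * 2^n and `i >> m` is
-- floordiv by 2^m (exact for the nonnegative shift amounts reached here; A only calls 1 ≤ n ≤ L = 4).
def RotLBit (i : Int) (L n : Int) : Int :=
  PickBit i 0 (L - n).toNat * 2 ^ n.toNat + PySem.Int.floordiv i (2 ^ (L - n).toNat)

-- the `while 1:` loop of CalPriR; fuel 4 suffices: count starts at 1 and RotLBit(v, 4, 4) = v for every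
-- int v (lemma pvRot4_eq below), so the loop always breaks by count = 4.
def pvLoop (v : Int) (count : Int) : Nat → Int
  | 0 => count
  | fuel + 1 => if RotLBit v pvN count = v then count else pvLoop v (count + 1) fuel

def CalPriR (PriC : List Int) : List Int :=
  (PySem.List.pyRange 0 (PySem.List.len PriC) 1).foldl
    (fun PriR i => PriR ++ [pvLoop (PySem.List.pyGetD PriC i 0) 1 4]) []

-- ===== PORT B =====
-- _PERIOD = {0: 1, 15: 1, 5: 2, 10: 2}
def pvPeriodTable : PySem.Dict Int Int := PySem.Dict.mk [(0, 1), (15, 1), (5, 2), (10, 2)]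

def CalPriR_alt (PriC : List Int) : List Int :=
  PriC.map (fun v => PySem.Dict.getD pvPeriodTable v 4)

-- ===== PRECONDITION & SPEC =====
def Spec_CalPriR (PriC : List Int) (out : List Int) : Prop := out = CalPriR_alt PriC
instance (PriC : List Int) (out : List Int) : Decidable (Spec_CalPriR PriC out) := by unfold Spec_CalPriR; infer_instance

-- ===== CLAIM (what is proved, stated in full; the proofs are below) =====
def Claim_equal_CalPriR : Prop := ∀ (PriC : List Int), Dom_CalPriR PriC → Spec_CalPriR PriC (CalPriR PriC)

-- ===== LEMMAS AND PROOFS =====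

-- the four loop conditions, characterised over ALL ints (not just 4-bit values)
lemma pvRot1_iff (v : Int) : RotLBit v 4 1 = v ↔ (v = 0 ∨ v = 15) := by
  simp only [RotLBit, PickBit]
  norm_num [show Int.toNat 1 = 1 from rfl, show Int.toNat 2 = 2 from rfl,
    show Int.toNat 3 = 3 from rfl, show Int.toNat 4 = 4 from rfl]
  omega

lemma pvRot2_iff (v : Int) : RotLBit v 4 2 = v ↔ (v = 0 ∨ v = 5 ∨ v = 10 ∨ v = 15) := by
  simp only [RotLBit, PickBit]
  norm_num [show Int.toNat 1 = 1 from rfl, show Int.toNat 2 = 2 from rfl,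
    show Int.toNat 3 = 3 from rfl, show Int.toNat 4 = 4 from rfl]
  omega

lemma pvRot3_iff (v : Int) : RotLBit v 4 3 = v ↔ (v = 0 ∨ v = 15) := by
  simp only [RotLBit, PickBit]
  norm_num [show Int.toNat 1 = 1 from rfl, show Int.toNat 2 = 2 from rfl,
    show Int.toNat 3 = 3 from rfl, show Int.toNat 4 = 4 from rfl]
  omega

lemma pvRot4_eq (v : Int) : RotLBit v 4 4 = v := by
  simp only [RotLBit, PickBit]
  norm_num [show Int.toNat 1 = 1 from rfl, show Int.toNat 2 = 2 from rfl,
    show Int.toNat 3 = 3 from rfl, show Int.toNat 4 = 4 from rfl]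

-- pointwise agreement: A's loop value is B's table value, for every int
lemma pvLoop_eq_table (v : Int) : pvLoop v 1 4 = PySem.Dict.getD pvPeriodTable v 4 := by
  by_cases h0 : v = 0
  · subst h0; decide
  by_cases h15 : v = 15
  · subst h15; decide
  by_cases h5 : v = 5
  · subst h5; decide
  by_cases h10 : v = 10
  · subst h10; decide
  -- v outside the table: the first three loop conditions are false, the fourth always holds → 4;
  -- and the dict lookup misses every key → default 4
  have c1 : RotLBit v 4 1 ≠ v := by rw [Ne, pvRot1_iff]; tauto
  have c2 : RotLBit v 4 2 ≠ v := by rw [Ne, pvRot2_iff]; tauto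
  have c3 : RotLBit v 4 3 ≠ v := by rw [Ne, pvRot3_iff]; tauto
  have c4 : RotLBit v 4 4 = v := pvRot4_eq v
  have hL : pvLoop v 1 4 = 4 := by
    simp only [pvLoop, pvN]
    norm_num [c1, c2, c3, c4]
  have hR : PySem.Dict.getD pvPeriodTable v 4 = 4 := by
    simp only [pvPeriodTable, PySem.Dict.getD, PySem.Dict.get?_mk_cons, beq_iff_eq]
    rw [if_neg (by omega), if_neg (by omega), if_neg (by omega), if_neg (by omega)]
    simp [PySem.Dict.get?]
  rw [hL, hR]

-- ===== VERDICT (by name: the statement is the Claim_ definition above) =====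
theorem CalPriR_spec : Claim_equal_CalPriR := by
  intro PriC _
  unfold Spec_CalPriR CalPriR CalPriR_alt
  rw [PySem.List.foldl_append_singleton_eq_map]
  simp only [PySem.List.len_eq, List.nil_append]
  have hsplit : ((PySem.List.pyRange 0 (PriC.length : Int) 1).map
        (fun i => pvLoop (PySem.List.pyGetD PriC i 0) 1 4))
      = ((PySem.List.pyRange 0 (PriC.length : Int) 1).map
        (fun j => PySem.List.pyGetD PriC j 0)).map (fun v => pvLoop v 1 4) := by
    rw [List.map_map]; rfl
  rw [hsplit, PySem.List.map_pyGetD_pyRange_zero']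
  exact List.map_congr_left (fun v _ => pvLoop_eq_table v)
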